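-- pv_equiv track=rewrite | github.com/peterpei666/leetcode_python | 3834. Merge Adjacent Equal Elements.py | mergeAdjacent
-- ===== SOURCE A (Python) =====
-- from typing import List
--
-- def mergeAdjacent(nums: List[int]) -> List[int]:
--     ans = []
--     for num in nums:
--         temp = num
--         while ans and ans[-1] == temp:
--             temp *= 2
--             ans.pop()
--         ans.append(temp)
--     return ans
-- ===== SOURCE B (Python) =====
-- from typing import List
--
-- def mergeAdjacent(nums: List[int]) -> List[int]:
--     result = list(nums)
--     while True:
--         found = -1
--         i = 0
--         while i + 1 < len(result):
--             if result[i] == result[i + 1]: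
--                 found = i
--                 break
--             i += 1
--         if found == -1:
--             return result
--         result[found] *= 2
--         del result[found + 1]
-- ===== Notes on version B (the rewrite author's own statement) =====
-- stated objective: alternative
-- what changed: Replaces the one-pass stack algorithm by a repeated-pass reduction on a copy of the list: scan for the leftmost adjacent equal pair, merge it in place (double, delete), and restart the scan until no pair remains.
import Mathlib
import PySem

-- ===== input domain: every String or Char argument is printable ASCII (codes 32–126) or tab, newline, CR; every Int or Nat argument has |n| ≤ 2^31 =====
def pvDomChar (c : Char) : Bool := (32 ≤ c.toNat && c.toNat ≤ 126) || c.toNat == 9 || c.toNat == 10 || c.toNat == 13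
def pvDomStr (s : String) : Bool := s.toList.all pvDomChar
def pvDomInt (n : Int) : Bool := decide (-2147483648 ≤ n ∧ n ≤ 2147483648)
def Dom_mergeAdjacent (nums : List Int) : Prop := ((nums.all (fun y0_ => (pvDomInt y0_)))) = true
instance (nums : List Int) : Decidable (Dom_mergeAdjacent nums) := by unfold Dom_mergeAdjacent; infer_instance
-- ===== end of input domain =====

-- B replaces A's single stack pass by a repeated-pass reduction (merge the leftmost
-- adjacent equal pair, restart) on a copy of the list: alternative decomposition, not faster.

-- ===== PORT A =====
-- the `while ans and ans[-1] == temp` loop; the stack is kept head-first (head = ans[-1])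
def pyWhile : List Int → Int → List Int × Int
  | [], t => ([], t)
  | a :: s, t => if a = t then pyWhile s (2 * t) else (a :: s, t)

-- one iteration of the `for num in nums` body: run the while loop, then append temp
def stackStep (ans : List Int) (num : Int) : List Int :=
  let p := pyWhile ans num
  p.2 :: p.1

def mergeAdjacent (nums : List Int) : List Int :=
  (nums.foldl stackStep []).reverse

-- ===== PORT B =====
-- the inner scan of B: index of the first i with result[i] == result[i+1], if any
def findPair : List Int → Option Nat
  | a :: b :: t => if a = b then some 0 else (findPair (b :: t)).map (· + 1)
  | _ => none

-- result[i] *= 2; del result[i+1]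
def mergeAt (l : List Int) (i : Nat) : List Int :=
  l.take i ++ (2 * l.getD i 0) :: l.drop (i + 2)

theorem findPair_some_lt : ∀ (l : List Int) (i : Nat), findPair l = some i → i + 1 < l.length
  | a :: b :: t, i, h => by
    by_cases hab : a = b
    · simp [findPair, hab] at h
      simp only [List.length_cons]; omega
    · simp [findPair, hab] at h
      obtain ⟨j, hj, rfl⟩ := h
      have := findPair_some_lt (b :: t) j hj
      simp only [List.length_cons] at this ⊢; omega

theorem mergeAt_lt (l : List Int) (i : Nat) (h : findPair l = some i) :
    (mergeAt l i).length < l.length := by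
  have := findPair_some_lt l i h
  simp [mergeAt]; omega

-- B's outer `while True` loop: merge the leftmost pair and restart, until none remains
def reduceB (l : List Int) : List Int :=
  match h : findPair l with
  | none => l
  | some i => reduceB (mergeAt l i)
termination_by l.length
decreasing_by exact mergeAt_lt l i h

def mergeAdjacent_alt (nums : List Int) : List Int := reduceB nums

-- ===== PRECONDITION & SPEC =====
def Spec_mergeAdjacent (nums : List Int) (out : List Int) : Prop := out = mergeAdjacent_alt nums
instance (nums : List Int) (out : List Int) : Decidable (Spec_mergeAdjacent nums out) := by unfold Spec_mergeAdjacent; infer_instance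

-- ===== CLAIM (what is proved, stated in full; the proofs are below) =====
def Claim_equal_mergeAdjacent : Prop := ∀ (nums : List Int), Dom_mergeAdjacent nums → Spec_mergeAdjacent nums (mergeAdjacent nums)

-- ===== LEMMAS AND PROOFS =====

theorem stackStep_nil (t : Int) : stackStep [] t = [t] := rfl

theorem stackStep_cons_eq (a : Int) (s : List Int) (t : Int) (h : a = t) :
    stackStep (a :: s) t = stackStep s (2 * t) := by
  simp [stackStep, pyWhile, h]

theorem stackStep_cons_ne (a : Int) (s : List Int) (t : Int) (h : ¬ a = t) :
    stackStep (a :: s) t = t :: a :: s := by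
  simp [stackStep, pyWhile, h]

theorem chain_stackStep : ∀ (s : List Int) (t : Int),
    List.IsChain (· ≠ ·) s → List.IsChain (· ≠ ·) (stackStep s t)
  | [], t, _ => by simp [stackStep_nil]
  | a :: s, t, h => by
    by_cases hat : a = t
    · rw [stackStep_cons_eq a s t hat]
      exact chain_stackStep s (2 * t) ((List.isChain_cons.mp h).2)
    · rw [stackStep_cons_ne a s t hat]
      exact List.isChain_cons_cons.mpr ⟨fun e => hat e.symm, h⟩

theorem findPair_of_chain : ∀ (l : List Int), List.IsChain (· ≠ ·) l → findPair l = none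
  | [], _ => rfl
  | [_], _ => rfl
  | a :: b :: t, h => by
    obtain ⟨hab, ht⟩ := List.isChain_cons_cons.mp h
    simp [findPair, hab, findPair_of_chain (b :: t) ht]

theorem chain_rev {s : List Int} (h : List.IsChain (· ≠ ·) s) :
    List.IsChain (· ≠ ·) s.reverse := by
  rw [List.isChain_reverse]
  exact h.imp fun _ _ hne => Ne.symm hne

theorem findPair_prefix : ∀ (l : List Int) (x : Int) (rest : List Int),
    List.IsChain (· ≠ ·) (l ++ [x]) →
    findPair (l ++ x :: x :: rest) = some l.length
  | [], x, rest, _ => by simp [findPair]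
  | a :: l, x, rest, h => by
    obtain ⟨ha, hl⟩ := List.isChain_cons.mp h
    have ih := findPair_prefix l x rest hl
    cases l with
    | nil =>
      have hax : a ≠ x := ha x (by simp)
      simp [findPair, hax]
    | cons b l' =>
      have hab : a ≠ b := ha b (by simp)
      simp only [List.cons_append, findPair, hab, if_false]
      simp only [List.cons_append] at ih
      rw [ih]; simp

theorem mergeAt_prefix : ∀ (p : List Int) (x : Int) (r : List Int),
    mergeAt (p ++ x :: x :: r) p.length = p ++ (2 * x) :: r
  | [], x, r => by simp [mergeAt]
  | a :: p, x, r => by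
    have ih := mergeAt_prefix p x r
    have step : mergeAt ((a :: p) ++ x :: x :: r) (a :: p).length
        = a :: mergeAt (p ++ x :: x :: r) p.length := by
      simp only [List.cons_append, List.length_cons, mergeAt, List.take_succ_cons,
        List.getD_cons_succ, show p.length + 1 + 2 = (p.length + 2) + 1 from rfl,
        List.drop_succ_cons]
    rw [step, ih]; simp

theorem reduceB_none {l : List Int} (h : findPair l = none) : reduceB l = l := by
  rw [reduceB]; split <;> simp_all

theorem reduceB_some {l : List Int} {i : Nat} (h : findPair l = some i) :
    reduceB l = reduceB (mergeAt l i) := by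
  rw [reduceB]; split <;> simp_all

-- the while-loop correspondence: merging at the junction, leftmost-first, is A's pop loop
theorem aux_while : ∀ (s : List Int) (t : Int) (rest : List Int),
    List.IsChain (· ≠ ·) s →
    reduceB (s.reverse ++ t :: rest) = reduceB ((stackStep s t).reverse ++ rest)
  | [], t, rest, _ => by simp [stackStep_nil]
  | a :: s, t, rest, h => by
    obtain ⟨_, hs⟩ := List.isChain_cons.mp h
    by_cases hat : a = t
    · subst hat
      have hc : List.IsChain (· ≠ ·) (s.reverse ++ [a]) := by
        have := chain_rev h; simpa using this
      have hf : findPair (s.reverse ++ a :: a :: rest) = some s.reverse.length :=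
        findPair_prefix s.reverse a rest hc
      have step : reduceB ((a :: s).reverse ++ a :: rest)
          = reduceB (s.reverse ++ (2 * a) :: rest) := by
        have hs2 := reduceB_some hf
        rw [mergeAt_prefix s.reverse a rest] at hs2
        simpa using hs2
      rw [step, aux_while s (2 * a) rest hs, stackStep_cons_eq a s a rfl]
    · rw [stackStep_cons_ne a s t hat]
      simp

theorem main_lemma : ∀ (rest s : List Int), List.IsChain (· ≠ ·) s →
    reduceB (s.reverse ++ rest) = (rest.foldl stackStep s).reverse
  | [], s, h => by
    simpa using reduceB_none (findPair_of_chain s.reverse (chain_rev h))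
  | x :: rest, s, h => by
    rw [List.foldl_cons, aux_while s x rest h,
        main_lemma rest (stackStep s x) (chain_stackStep s x h)]

-- ===== VERDICT (by name: the statement is the Claim_ definition above) =====
theorem mergeAdjacent_spec : Claim_equal_mergeAdjacent := by
  intro nums _
  show mergeAdjacent nums = mergeAdjacent_alt nums
  have := main_lemma nums [] List.IsChain.nil
  simpa [mergeAdjacent, mergeAdjacent_alt] using this.symm
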